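-- pv_equiv track=rewrite | github.com/sciman-top/governed-ai-coding-runtime | scripts/apply-target-repo-governance.py | _command_group_satisfies
-- ===== SOURCE A (Python) =====
-- from typing import Any
--
-- def _command_group_satisfies(actual_group: list[dict[str, Any]], expected_group: list[dict[str, Any]]) -> bool:
--     actual_by_id = {str(item.get("id") or "").strip(): str(item.get("command") or "").strip() for item in actual_group}
--     actual_commands = {str(item.get("command") or "").strip() for item in actual_group}
--     for expected in expected_group:
--         expected_id = str(expected.get("id") or "").strip()
--         expected_command = str(expected.get("command") or "").strip()
--         if expected_id:
--             if actual_by_id.get(expected_id) != expected_command: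
--                 return False
--         elif expected_command not in actual_commands:
--             return False
--     return True
-- ===== SOURCE B (Python) =====
-- def _command_group_satisfies(actual_group, expected_group):
--     # One pass over actual_group, maintaining a status flag per expected requirement:
--     # id-requirements get overwritten on each id match (so the last match wins),
--     # command-requirements get OR-ed in.
--     reqs = [(str(e.get("id") or "").strip(), str(e.get("command") or "").strip())
--             for e in expected_group]
--     status = [False] * len(reqs)
--     for item in actual_group:
--         aid = str(item.get("id") or "").strip()
--         acmd = str(item.get("command") or "").strip()
--         for j, (eid, ecmd) in enumerate(reqs):
--             if eid:
--                 if aid == eid: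
--                     status[j] = (acmd == ecmd)
--             elif acmd == ecmd:
--                 status[j] = True
--     return all(status)
-- ===== Notes on version B (the rewrite author's own statement) =====
-- stated objective: alternative
-- what changed: B transposes the loops: instead of precomputing an id->command dict and a command set and then checking each expected item by lookup, B makes a single pass over actual_group updating a per-requirement status vector (overwriting on each id match so the last duplicate id wins, OR-ing matches for id-less requirements) and returns all(status).
import Mathlib
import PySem

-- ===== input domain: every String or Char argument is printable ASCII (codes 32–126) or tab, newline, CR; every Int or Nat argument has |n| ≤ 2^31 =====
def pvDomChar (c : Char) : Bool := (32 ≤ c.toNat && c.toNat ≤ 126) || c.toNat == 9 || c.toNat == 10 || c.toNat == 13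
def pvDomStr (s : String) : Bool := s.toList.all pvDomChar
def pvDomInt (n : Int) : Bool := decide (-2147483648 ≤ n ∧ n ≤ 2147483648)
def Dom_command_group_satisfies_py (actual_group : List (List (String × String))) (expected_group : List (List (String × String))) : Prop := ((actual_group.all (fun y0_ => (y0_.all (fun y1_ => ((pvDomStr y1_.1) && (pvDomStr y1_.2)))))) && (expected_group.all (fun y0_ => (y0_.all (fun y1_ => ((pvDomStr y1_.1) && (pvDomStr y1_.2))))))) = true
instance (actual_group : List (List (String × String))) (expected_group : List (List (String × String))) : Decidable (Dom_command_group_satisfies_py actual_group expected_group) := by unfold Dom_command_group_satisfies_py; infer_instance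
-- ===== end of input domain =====

-- B is an equivalent alternative: it transposes the loops — one pass over actual_group
-- updating a per-requirement status vector (overwrite on id matches, OR for command matches)
-- instead of A's precomputed dict/set plus per-expected lookups.

-- ===== PORT A =====
-- str(item.get(k) or "").strip()  (values are strings; '' or a missing key both normalise to "")
def pvNorm (item : List (String × String)) (k : String) : String :=
  PySem.Str.strip ((PySem.Dict.mk item).getD k "")

-- the 'for expected in expected_group' loop with its early returns
def pvALoop (actual_by_id : PySem.Dict String String) (actual_commands : PySem.Set String) :
    List (List (String × String)) → Bool
  | [] => true
  | expected :: rest =>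
    let expected_id := pvNorm expected "id"
    let expected_command := pvNorm expected "command"
    if expected_id ≠ "" then
      if actual_by_id.get? expected_id ≠ some expected_command then false
      else pvALoop actual_by_id actual_commands rest
    else if !(PySem.Set.contains actual_commands expected_command) then false
    else pvALoop actual_by_id actual_commands rest

def command_group_satisfies_py (actual_group : List (List (String × String))) (expected_group : List (List (String × String))) : Bool :=
  let actual_by_id : PySem.Dict String String :=
    actual_group.foldl (fun d item => d.insert (pvNorm item "id") (pvNorm item "command")) PySem.Dict.empty
  let actual_commands : PySem.Set String :=
    PySem.Set.ofList (actual_group.map (fun item => pvNorm item "command"))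
  pvALoop actual_by_id actual_commands expected_group

-- ===== PORT B =====
-- the inner 'for j, (eid, ecmd) in enumerate(reqs): status[j] = …' indexwise update
def pvBUpdate (aid acmd : String) (r : String × String) (st : Bool) : Bool :=
  if r.1 ≠ "" then (if aid == r.1 then (acmd == r.2) else st)
  else (st || (acmd == r.2))

def command_group_satisfies_py_alt (actual_group : List (List (String × String))) (expected_group : List (List (String × String))) : Bool :=
  let reqs := expected_group.map (fun e => (pvNorm e "id", pvNorm e "command"))
  let final := actual_group.foldl (fun status item =>
      let aid := pvNorm item "id"
      let acmd := pvNorm item "command"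
      List.zipWith (pvBUpdate aid acmd) reqs status)
    (reqs.map (fun _ => false))
  final.all (fun b => b)

-- ===== PRECONDITION & SPEC =====
def Spec_command_group_satisfies_py (actual_group : List (List (String × String))) (expected_group : List (List (String × String))) (out : Bool) : Prop := out = command_group_satisfies_py_alt actual_group expected_group
instance (actual_group : List (List (String × String))) (expected_group : List (List (String × String))) (out : Bool) : Decidable (Spec_command_group_satisfies_py actual_group expected_group out) := by unfold Spec_command_group_satisfies_py; infer_instance

-- ===== CLAIM (what is proved, stated in full; the proofs are below) =====
def Claim_equal_command_group_satisfies_py : Prop := ∀ (actual_group : List (List (String × String))) (expected_group : List (List (String × String))), Dom_command_group_satisfies_py actual_group expected_group → Spec_command_group_satisfies_py actual_group expected_group (command_group_satisfies_py actual_group expected_group)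

-- ===== LEMMAS AND PROOFS =====

-- common characterisation of one requirement's verdict against actual_group
def pvCheck (a : List (List (String × String))) (r : String × String) : Bool :=
  if r.1 ≠ "" then
    match a.reverse.find? (fun item => pvNorm item "id" == r.1) with
    | some item => pvNorm item "command" == r.2
    | none => false
  else a.any (fun item => pvNorm item "command" == r.2)

theorem zipWith_map_self {α β γ : Type} (f : α → β → γ) (g : α → β) (l : List α) :
    List.zipWith f l (l.map g) = l.map (fun x => f x (g x)) := by
  induction l with
  | nil => rfl
  | cons x xs ih => simp [List.zipWith, ih]

-- the B fold's status vector is pointwise pvCheck of the actuals seen so far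
theorem foldB_eq (reqs : List (String × String)) (a : List (List (String × String))) :
    a.foldl (fun status item =>
        List.zipWith (pvBUpdate (pvNorm item "id") (pvNorm item "command")) reqs status)
      (reqs.map (fun _ => false))
      = reqs.map (fun r => pvCheck a r) := by
  induction a using List.reverseRecOn with
  | nil =>
    apply List.map_congr_left
    intro r _
    unfold pvCheck
    by_cases h : r.1 = "" <;> simp [h]
  | append_singleton init last ih =>
    rw [List.foldl_append, List.foldl_cons, List.foldl_nil, ih, zipWith_map_self]
    apply List.map_congr_left
    intro r _
    unfold pvBUpdate pvCheck
    rw [List.reverse_append]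
    simp only [List.reverse_singleton, List.singleton_append, List.find?_cons, List.any_append,
      List.any_cons, List.any_nil]
    by_cases hid : r.1 = ""
    · simp [hid]
    · by_cases hm : pvNorm last "id" = r.1
      · simp [hid, hm]
      · have hb : (pvNorm last "id" == r.1) = false := by simp [hm]
        simp [hid, hb]

theorem alt_eq_all (a e : List (List (String × String))) :
    command_group_satisfies_py_alt a e
      = e.all (fun x => pvCheck a (pvNorm x "id", pvNorm x "command")) := by
  show (a.foldl (fun status item =>
        List.zipWith (pvBUpdate (pvNorm item "id") (pvNorm item "command"))
          (e.map (fun x => (pvNorm x "id", pvNorm x "command"))) status)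
      ((e.map (fun x => (pvNorm x "id", pvNorm x "command"))).map (fun _ => false))).all (fun b => b) = _
  rw [foldB_eq]
  rw [List.all_map, List.all_map]
  rfl

-- lookup in the insert-fold dict is the value of the LAST item whose key matches
theorem get?_foldl_insert_eq_find_reverse (a : List (List (String × String))) (x : String) :
    (a.foldl (fun d item => d.insert (pvNorm item "id") (pvNorm item "command")) PySem.Dict.empty).get? x
      = (a.reverse.find? (fun item => pvNorm item "id" == x)).map (fun item => pvNorm item "command") := by
  induction a using List.reverseRecOn with
  | nil => simp [PySem.Dict.get?_empty]
  | append_singleton init last ih =>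
    rw [List.foldl_append, List.reverse_append]
    simp only [List.foldl_cons, List.foldl_nil, List.reverse_singleton, List.singleton_append,
      List.find?_cons]
    by_cases h : pvNorm last "id" = x
    · simp [h, PySem.Dict.get?_insert_self]
    · have hb : (pvNorm last "id" == x) = false := by simp [h]
      rw [PySem.Dict.get?_insert_of_ne _ _ (fun hx => h hx.symm), hb, ih]

theorem contains_ofList_map (a : List (List (String × String))) (c : String) :
    PySem.Set.contains (PySem.Set.ofList (a.map (fun item => pvNorm item "command"))) c
      = a.any (fun item => pvNorm item "command" == c) := by
  by_cases hm : c ∈ a.map (fun item => pvNorm item "command")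
  · have h1 : PySem.Set.contains (PySem.Set.ofList (a.map (fun item => pvNorm item "command"))) c = true :=
      (PySem.Set.contains_iff _ _).mpr ((PySem.Set.mem_ofList _ _).mpr hm)
    rcases List.mem_map.mp hm with ⟨item, hmem, he⟩
    rw [h1]; symm; rw [List.any_eq_true]
    exact ⟨item, hmem, by simp [he]⟩
  · have h1 : PySem.Set.contains (PySem.Set.ofList (a.map (fun item => pvNorm item "command"))) c = false := by
      cases h : PySem.Set.contains (PySem.Set.ofList (a.map (fun item => pvNorm item "command"))) c with
      | false => rfl
      | true => exact absurd ((PySem.Set.mem_ofList _ _).mp ((PySem.Set.contains_iff _ _).mp h)) hm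
    rw [h1]; symm; rw [List.any_eq_false]
    intro item hi hb
    exact hm (List.mem_map.mpr ⟨item, hi, eq_of_beq hb⟩)

theorem pvALoop_eq_all (d : PySem.Dict String String) (s : PySem.Set String)
    (a : List (List (String × String)))
    (hd : ∀ x, d.get? x = (a.reverse.find? (fun item => pvNorm item "id" == x)).map (fun item => pvNorm item "command"))
    (hs : ∀ c, PySem.Set.contains s c = a.any (fun item => pvNorm item "command" == c)) :
    ∀ e, pvALoop d s e = e.all (fun x => pvCheck a (pvNorm x "id", pvNorm x "command")) := by
  intro e
  induction e with
  | nil => rfl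
  | cons expected rest ih =>
    simp only [pvALoop, List.all_cons, ← ih]
    unfold pvCheck
    by_cases hid : pvNorm expected "id" = ""
    · have h1 : ¬ (pvNorm expected "id" ≠ "") := by simp [hid]
      rw [if_neg h1, if_neg h1, hs]
      cases a.any (fun item => pvNorm item "command" == pvNorm expected "command") <;> simp
    · rw [if_pos hid, if_pos hid, hd]
      cases hfind : a.reverse.find? (fun item => pvNorm item "id" == pvNorm expected "id") with
      | none => simp
      | some item =>
        by_cases hc : pvNorm item "command" = pvNorm expected "command"
        · simp [hc]
        · simp [hc]

-- ===== VERDICT (by name: the statement is the Claim_ definition above) =====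
theorem command_group_satisfies_py_spec : Claim_equal_command_group_satisfies_py := by
  intro a e _
  unfold Spec_command_group_satisfies_py command_group_satisfies_py
  rw [alt_eq_all]
  exact pvALoop_eq_all _ _ a
    (fun x => get?_foldl_insert_eq_find_reverse a x)
    (fun c => contains_ofList_map a c) e
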